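-- pv_equiv track=rewrite | github.com/wearypossum4770/refactored-waddle | python_refactored_waddle/anagram.py | stringAnagram
-- ===== SOURCE A (Python) =====
-- from collections import Counter
--
-- def stringAnagram(dictionary, query):
--     # Write your code here
--     counterDict = [Counter(word) for word in dictionary]
--     found = []
--
--     for word in query:
--         count = Counter(word)
--         yes = 0
--         for j in counterDict:
--             if count == j:
--                 yes += 1
--         found.append(yes)
--     return found
-- ===== SOURCE B (Python) =====
-- def stringAnagram(dictionary, query):
--     # Index dictionary words by sorted-letter signature once, then answer each
--     # query with a single hash lookup instead of scanning all dictionary Counters.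
--     index = {}
--     for word in dictionary:
--         sig = ''.join(sorted(word))
--         index[sig] = index.get(sig, 0) + 1
--     return [index.get(''.join(sorted(word)), 0) for word in query]
-- ===== Notes on version B (the rewrite author's own statement) =====
-- stated objective: faster
-- what changed: Replaces the per-query scan comparing a Counter against every dictionary Counter with a hash map from sorted-letter signature to dictionary word count, answered by one lookup per query.
import Mathlib
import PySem

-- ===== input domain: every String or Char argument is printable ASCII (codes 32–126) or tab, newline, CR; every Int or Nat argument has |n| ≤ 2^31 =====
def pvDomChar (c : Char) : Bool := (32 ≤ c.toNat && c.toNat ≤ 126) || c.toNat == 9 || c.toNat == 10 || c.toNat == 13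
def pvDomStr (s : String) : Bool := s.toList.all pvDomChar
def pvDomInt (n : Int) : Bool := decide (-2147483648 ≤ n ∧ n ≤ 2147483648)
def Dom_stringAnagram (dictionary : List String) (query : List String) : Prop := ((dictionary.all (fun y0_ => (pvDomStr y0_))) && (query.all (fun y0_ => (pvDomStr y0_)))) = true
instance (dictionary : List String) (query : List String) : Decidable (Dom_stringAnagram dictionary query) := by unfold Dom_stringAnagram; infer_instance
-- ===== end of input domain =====

-- B indexes the dictionary by sorted-letter signature and answers each query by one lookup (asymptotically faster than A's per-query scan).

-- ===== PORT A =====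
-- Python's `Counter == Counter` (counts compared as a mapping; a key missing on one side counts as 0)
def pyCounterEq (c j : PySem.Dict Char Int) : Bool :=
  (c.keys ++ j.keys).all (fun k => c.getD k 0 == j.getD k 0)

def stringAnagram (dictionary : List String) (query : List String) : List Int :=
  let counterDict := dictionary.map (fun word => PySem.Dict.counter word.toList)
  query.foldl
    (fun found word =>
      let count := PySem.Dict.counter word.toList
      let yes := counterDict.foldl (fun yes j => if pyCounterEq count j then yes + 1 else yes) (0 : Int)
      found ++ [yes])
    []

-- ===== PORT B =====
-- ''.join(sorted(word))
def sigB (word : String) : String := String.ofList (PySem.List.sorted word.toList (fun c => c) false)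

def stringAnagram_alt (dictionary : List String) (query : List String) : List Int :=
  let index := dictionary.foldl
    (fun d word => d.insert (sigB word) (d.getD (sigB word) 0 + 1)) PySem.Dict.empty
  query.map (fun word => index.getD (sigB word) 0)

-- ===== PRECONDITION & SPEC =====
def Spec_stringAnagram (dictionary : List String) (query : List String) (out : List Int) : Prop := out = stringAnagram_alt dictionary query
instance (dictionary : List String) (query : List String) (out : List Int) : Decidable (Spec_stringAnagram dictionary query out) := by unfold Spec_stringAnagram; infer_instance

-- ===== CLAIM (what is proved, stated in full; the proofs are below) =====
def Claim_equal_stringAnagram : Prop := ∀ (dictionary : List String) (query : List String), Dom_stringAnagram dictionary query → Spec_stringAnagram dictionary query (stringAnagram dictionary query)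

-- ===== LEMMAS AND PROOFS =====

-- Counter equality is permutation of the underlying letter lists
theorem pyCounterEq_iff_perm (xs ys : List Char) :
    pyCounterEq (PySem.Dict.counter xs) (PySem.Dict.counter ys) = true ↔ xs.Perm ys := by
  unfold pyCounterEq
  simp only [List.all_eq_true, List.mem_append, PySem.Dict.getD_counter,
    PySem.Dict.keys_counter, PySem.Set.mem_ofList, beq_iff_eq]
  constructor
  · intro h
    rw [List.perm_iff_count]
    intro a
    by_cases ha : a ∈ xs ∨ a ∈ ys
    · exact_mod_cast h a ha
    · rw [not_or] at ha
      rw [List.count_eq_zero_of_not_mem ha.1, List.count_eq_zero_of_not_mem ha.2]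
  · intro h k _
    exact_mod_cast h.count_eq k

-- equal signatures are permutation of the underlying letter lists
theorem sigB_eq_iff_perm (v w : String) : (sigB v == sigB w) = true ↔ v.toList.Perm w.toList := by
  unfold sigB
  rw [beq_iff_eq, String.ofList_inj]
  exact PySem.List.sorted_id_eq_sorted_id_iff_perm (xs := v.toList) (ys := w.toList)

theorem stringAnagram_eq (dictionary query : List String) :
    stringAnagram dictionary query = stringAnagram_alt dictionary query := by
  unfold stringAnagram stringAnagram_alt
  rw [PySem.List.foldl_append_singleton_eq_map, List.nil_append]
  apply List.map_congr_left
  intro w _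
  -- A side: the inner loop is a countP over the dictionary
  rw [PySem.List.foldl_if_add_one, zero_add, List.countP_map]
  -- B side: the index lookup is a count over the signature list
  rw [← List.foldl_map (f := sigB)
      (g := fun (d : PySem.Dict String Int) s => d.insert s (d.getD s 0 + 1)),
    PySem.Dict.getD_foldl_insert_add_one, PySem.Dict.getD_empty, zero_add,
    List.count_eq_countP, List.countP_map]
  congr 1
  refine List.countP_congr ?_
  intro d _
  simp only [Function.comp]
  by_cases hp : w.toList.Perm d.toList
  · have h1 : pyCounterEq (PySem.Dict.counter w.toList) (PySem.Dict.counter d.toList) = true :=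
      (pyCounterEq_iff_perm _ _).mpr hp
    have h2 : (sigB d == sigB w) = true := (sigB_eq_iff_perm _ _).mpr hp.symm
    rw [h1, h2]
  · have h1 : pyCounterEq (PySem.Dict.counter w.toList) (PySem.Dict.counter d.toList) = false := by
      rw [Bool.eq_false_iff]; intro h; exact hp ((pyCounterEq_iff_perm _ _).mp h)
    have h2 : (sigB d == sigB w) = false := by
      rw [Bool.eq_false_iff]; intro h; exact hp ((sigB_eq_iff_perm _ _).mp h).symm
    rw [h1, h2]

-- ===== VERDICT (by name: the statement is the Claim_ definition above) =====
theorem stringAnagram_spec : Claim_equal_stringAnagram := by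
  intro dictionary query _
  unfold Spec_stringAnagram
  exact stringAnagram_eq dictionary query
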